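-- pv_equiv track=rewrite | github.com/iamrishap/PythonBits | InterviewBits/tree/hotel-reviews.py | solve
-- ===== SOURCE A (Python) =====
-- def solve(A, B):
--     goodWords = set(A.split("_"))
--     # Making it into a set is important, as searching through a set is faster
--     V = []
--     for index in range(len(B)):
--         countGoodWords = 0
--         for word in B[index].split("_"):
--             if word in goodWords:
--                 countGoodWords += 1
--         V.append([index, countGoodWords])  # store the index and the count
--     V.sort(key=lambda a: a[1], reverse=True)  # use the count to sort (descending order)
--     return [x[0] for x in V]  # return the sorted list of indexes
-- ===== SOURCE B (Python) =====
-- def solve(A, B):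
--     good = set(A.split("_"))
--     counts = [sum(w in good for w in r.split("_")) for r in B]
--     buckets = {}
--     for i, c in enumerate(counts):
--         buckets.setdefault(c, []).append(i)
--     out = []
--     for c in range(max(counts, default=-1), -1, -1):
--         out += buckets.get(c, [])
--     return out
-- ===== Notes on version B (the rewrite author's own statement) =====
-- stated objective: alternative
-- what changed: Replaces building index/count pairs and stable reverse sorting by a counting/bucketing pass: indices are grouped in a dict keyed by match count and emitted from the maximum count down to 0, which reproduces the stable sort's order without sorting.
import Mathlib
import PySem

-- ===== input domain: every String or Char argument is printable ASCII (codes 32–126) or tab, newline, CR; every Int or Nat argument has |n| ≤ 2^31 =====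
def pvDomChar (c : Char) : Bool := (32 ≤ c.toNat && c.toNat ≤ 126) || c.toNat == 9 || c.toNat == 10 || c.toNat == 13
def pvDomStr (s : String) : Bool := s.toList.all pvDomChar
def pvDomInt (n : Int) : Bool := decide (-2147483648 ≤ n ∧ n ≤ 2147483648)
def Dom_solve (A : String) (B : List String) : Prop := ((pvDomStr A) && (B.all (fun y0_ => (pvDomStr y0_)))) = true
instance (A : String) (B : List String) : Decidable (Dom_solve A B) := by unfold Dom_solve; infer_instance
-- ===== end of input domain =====

-- B replaces A's build-(index,count)-pairs-then-stable-reverse-sort by a bucketing pass (dict: count ↦ indices)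
-- emitted from the maximum count down to 0; the return values are proved equal.

-- ===== PORT A =====
def solve (A : String) (B : List String) : List Int :=
  let goodWords : PySem.Set String := PySem.Set.ofList ((PySem.Str.split? A "_").getD [])
  let V : List (Int × Int) :=
    (PySem.List.pyRange 0 (PySem.List.len B) 1).foldl (fun V index =>
      let countGoodWords : Int :=
        ((PySem.Str.split? (PySem.List.pyGetD B index "") "_").getD []).foldl
          (fun c word => if goodWords.contains word then c + 1 else c) 0
      V ++ [(index, countGoodWords)]) []
  let V' := PySem.List.sorted V (fun a => a.2) true
  V'.map (fun x => x.1)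

-- ===== PORT B =====
def solve_alt (A : String) (B : List String) : List Int :=
  let good : PySem.Set String := PySem.Set.ofList ((PySem.Str.split? A "_").getD [])
  let counts : List Int :=
    B.map (fun r => (((PySem.Str.split? r "_").getD []).map
      (fun w => if good.contains w then (1 : Int) else 0)).sum)
  let buckets : PySem.Dict Int (List Int) :=
    (PySem.List.enumerate counts).foldl
      (fun d p => d.modify p.2 [] (fun l => l ++ [p.1])) PySem.Dict.empty
  (PySem.List.pyRange (PySem.List.maxD counts (fun x => x) (-1)) (-1) (-1)).foldl
    (fun out c => out ++ buckets.getD c []) []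

-- ===== PRECONDITION & SPEC =====
def Spec_solve (A : String) (B : List String) (out : List Int) : Prop := out = solve_alt A B
instance (A : String) (B : List String) (out : List Int) : Decidable (Spec_solve A B out) := by unfold Spec_solve; infer_instance

-- ===== CLAIM (what is proved, stated in full; the proofs are below) =====
def Claim_equal_solve : Prop := ∀ (A : String) (B : List String), Dom_solve A B → Spec_solve A B (solve A B)

-- ===== LEMMAS AND PROOFS =====

-- insertBy walks past a prefix it does not go before
theorem pv_insertBy_append_left {α : Type} (bef : α → α → Bool) (x : α) (l1 l2 : List α)
    (h : ∀ y ∈ l1, bef x y = false) :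
    PySem.List.insertBy bef x (l1 ++ l2) = l1 ++ PySem.List.insertBy bef x l2 := by
  induction l1 with
  | nil => simp
  | cons y t ih =>
      simp only [List.cons_append, PySem.List.insertBy, h y (by simp), Bool.false_eq_true,
        if_false, List.cons.injEq, true_and]
      exact ih (fun z hz => h z (by simp [hz]))

-- insertBy places x in front when it goes before everything
theorem pv_insertBy_front {α : Type} (bef : α → α → Bool) (x : α) (l : List α)
    (h : ∀ y ∈ l, bef x y = true) :
    PySem.List.insertBy bef x l = x :: l := by
  cases l with
  | nil => rfl
  | cons y t => simp [PySem.List.insertBy, h y (by simp)]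

-- inserting a fresh pair into the descending bucket concatenation appends it to its own bucket
theorem pv_insert_buckets (x : Int × Int) :
    ∀ (M : Nat), 0 ≤ x.2 → x.2 ≤ (M : Int) → ∀ (ps : List (Int × Int)),
    PySem.List.insertBy (fun a b => decide (b.2 < a.2)) x
        ((PySem.List.pyRange (M : Int) (-1) (-1)).flatMap
          (fun c => ps.filter (fun p => p.2 == c)))
      = (PySem.List.pyRange (M : Int) (-1) (-1)).flatMap
          (fun c => (ps ++ [x]).filter (fun p => p.2 == c)) := by
  intro M
  induction M with
  | zero =>
      intro h0 hM ps
      have hx : x.2 = 0 := le_antisymm (by exact_mod_cast hM) h0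
      have hr : PySem.List.pyRange ((0 : Nat) : Int) (-1) (-1) = [0] := by decide
      rw [hr]
      simp only [List.flatMap_cons, List.flatMap_nil, List.append_nil]
      rw [PySem.List.insertBy_of_forall_not_before]
      · simp [List.filter_append, hx]
      · intro y hy
        simp only [List.mem_filter, beq_iff_eq] at hy
        simp [hy.2, hx]
  | succ M ih =>
      intro h0 hM ps
      have hM' : x.2 ≤ (M : Int) + 1 := by push_cast at hM; omega
      have hcons : PySem.List.pyRange ((M + 1 : Nat) : Int) (-1) (-1)
          = ((M : Int) + 1) :: PySem.List.pyRange (M : Int) (-1) (-1) := by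
        push_cast
        rw [PySem.List.pyRange_neg_one_cons (by omega)]
        norm_num
      rw [hcons]
      simp only [List.flatMap_cons]
      by_cases hx : x.2 = (M : Int) + 1
      · rw [pv_insertBy_append_left _ _ _ _ ?hpre]
        case hpre =>
          intro y hy
          simp only [List.mem_filter, beq_iff_eq] at hy
          simp [hy.2, hx]
        rw [pv_insertBy_front _ _ _ ?hall]
        case hall =>
          intro y hy
          rcases List.mem_flatMap.mp hy with ⟨c, hc, hyc⟩
          have hcle : c ≤ (M : Int) := (PySem.List.mem_pyRange_neg_one.mp hc).2
          have hy2 : y.2 = c := by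
            simp only [List.mem_filter, beq_iff_eq] at hyc; exact hyc.2
          simp only [decide_eq_true_eq]
          omega
        have h1 : (ps ++ [x]).filter (fun p => p.2 == ((M : Int) + 1))
            = ps.filter (fun p => p.2 == ((M : Int) + 1)) ++ [x] := by
          simp [List.filter_append, hx]
        have h2 : (PySem.List.pyRange (M : Int) (-1) (-1)).flatMap
              (fun c => (ps ++ [x]).filter (fun p => p.2 == c))
            = (PySem.List.pyRange (M : Int) (-1) (-1)).flatMap
              (fun c => ps.filter (fun p => p.2 == c)) := by
          apply List.flatMap_congr
          intro c hc
          have hcle : c ≤ (M : Int) := (PySem.List.mem_pyRange_neg_one.mp hc).2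
          have : (x.2 == c) = false := by simp; omega
          simp [List.filter_append, this]
        rw [h1, h2]
        simp
      · have hx' : x.2 ≤ (M : Int) := by omega
        rw [pv_insertBy_append_left _ _ _ _ ?hpre2]
        case hpre2 =>
          intro y hy
          simp only [List.mem_filter, beq_iff_eq] at hy
          simp only [decide_eq_false_iff_not, not_lt]
          omega
        rw [ih h0 hx' ps]
        have h1 : (ps ++ [x]).filter (fun p => p.2 == ((M : Int) + 1))
            = ps.filter (fun p => p.2 == ((M : Int) + 1)) := by
          have : (x.2 == ((M : Int) + 1)) = false := by simp; omega
          simp [List.filter_append, this]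
        rw [h1]

-- the stable reverse sort by count IS the descending bucket concatenation
theorem pv_bucket_sorted (M : Nat) (ps : List (Int × Int))
    (h : ∀ p ∈ ps, 0 ≤ p.2 ∧ p.2 ≤ (M : Int)) :
    PySem.List.sorted ps (fun p => p.2) true
      = (PySem.List.pyRange (M : Int) (-1) (-1)).flatMap
          (fun c => ps.filter (fun p => p.2 == c)) := by
  induction ps using List.reverseRecOn with
  | nil => simp [PySem.List.sorted]
  | append_singleton ps x ih =>
      rw [PySem.List.sorted_rev_eq_foldl_insertBy, List.foldl_append,
        ← PySem.List.sorted_rev_eq_foldl_insertBy]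
      simp only [List.foldl_cons, List.foldl_nil]
      rw [ih (fun p hp => h p (by simp [hp]))]
      exact pv_insert_buckets x M (h x (by simp)).1 (h x (by simp)).2 ps

-- B's grouping dict looks up to the in-order index list of its bucket
theorem pv_getD_buckets (l : List (Int × Int)) (c : Int) :
    (l.foldl (fun d p => d.modify p.2 [] (fun t => t ++ [p.1])) PySem.Dict.empty).getD c []
      = (l.filter (fun p => p.2 == c)).map (fun p => p.1) := by
  have h1 : l.foldl (fun d p => d.modify p.2 [] (fun t => t ++ [p.1])) PySem.Dict.empty
      = (l.map Prod.swap).foldl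
          (fun d q => d.modify q.1 [] (fun t => t ++ [q.2])) PySem.Dict.empty := by
    rw [List.foldl_map]
    rfl
  rw [h1, PySem.Dict.getD_foldl_modify_append]
  simp [List.filter_map, Function.comp_def]

-- ===== VERDICT (by name: the statement is the Claim_ definition above) =====
theorem solve_spec : Claim_equal_solve := by
  intro A B _
  show solve A B = solve_alt A B
  unfold solve solve_alt
  dsimp only
  set gw : PySem.Set String := PySem.Set.ofList ((PySem.Str.split? A "_").getD []) with hgw
  set cntB : String → Int := fun r => (((PySem.Str.split? r "_").getD []).map
      (fun w => if gw.contains w then (1 : Int) else 0)).sum with hcntB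
  have hcount : ∀ s : String,
      ((PySem.Str.split? s "_").getD []).foldl
        (fun c w => if gw.contains w then c + 1 else c) 0 = cntB s := by
    intro s
    simp only [hcntB]
    rw [PySem.List.foldl_count_if (fun w => gw.contains w),
      PySem.List.sum_map_ite_one_zero (fun w => gw.contains w)]
    simp
  simp only [PySem.List.foldl_append_singleton_eq_map, List.nil_append, hcount]
  have hV : List.map (fun index => (index, cntB (PySem.List.pyGetD B index "")))
        (PySem.List.pyRange 0 (PySem.List.len B) 1)
      = PySem.List.enumerate (B.map cntB) := by
    rw [PySem.List.enumerate_eq_map_pyRange (B.map cntB) (cntB "")]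
    have hlen : PySem.List.len (B.map cntB) = PySem.List.len B := by
      simp [PySem.List.len_eq]
    rw [hlen]
    apply List.map_congr_left
    intro j _
    rw [PySem.List.pyGetD_map cntB B j ""]
  rw [hV]
  rw [PySem.List.foldl_append_eq_flatMap]
  simp only [List.nil_append, pv_getD_buckets]
  rcases hc : B.map cntB with _ | ⟨c0, ct⟩
  · simp [PySem.List.sorted, PySem.List.maxD, PySem.List.max?,
      PySem.List.pyRange_neg_one_eq_nil (by norm_num : (-1 : Int) ≤ -1),
      PySem.List.enumerate]
  · have hnnB : ∀ r : String, 0 ≤ cntB r := by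
      intro r
      simp only [hcntB]
      rw [PySem.List.sum_map_ite_one_zero (fun w => gw.contains w)]
      exact Int.natCast_nonneg _
    have hnn : ∀ y ∈ c0 :: ct, 0 ≤ y := by
      intro y hy
      rw [← hc] at hy
      rcases List.mem_map.mp hy with ⟨r, _, rfl⟩
      exact hnnB r
    have hub : ∀ y ∈ c0 :: ct, y ≤ ct.foldl max c0 := by
      intro y hy
      rcases List.mem_cons.mp hy with rfl | hy'
      · exact (PySem.List.le_foldl_max ct y).1
      · exact (PySem.List.le_foldl_max ct c0).2 y hy'
    have hm_nn : 0 ≤ ct.foldl max c0 :=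
      le_trans (hnn c0 (by simp)) (PySem.List.le_foldl_max ct c0).1
    have hmax : PySem.List.maxD (c0 :: ct) (fun x => x) (-1) = ct.foldl max c0 := by
      rw [PySem.List.maxD, PySem.List.max?_id_cons]
      rfl
    obtain ⟨M, hM⟩ : ∃ M : Nat, (M : Int) = ct.foldl max c0 :=
      ⟨(ct.foldl max c0).toNat, Int.toNat_of_nonneg hm_nn⟩
    rw [hmax, ← hM]
    rw [pv_bucket_sorted M (PySem.List.enumerate (c0 :: ct)) ?bounds]
    case bounds =>
      intro p hp
      rcases (PySem.List.mem_enumerate_iff (c0 :: ct) 0 p).mp hp with ⟨k, hk, rfl⟩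
      have hmem : (c0 :: ct)[k] ∈ c0 :: ct := List.getElem_mem hk
      exact ⟨hnn _ hmem, hM ▸ hub _ hmem⟩
    rw [List.map_flatMap]
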